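-- pv_equiv track=rewrite | github.com/aria-ml/dataeval | src/dataeval/core/_imagestats.py | _determine_channel_indices
-- ===== SOURCE A (Python) =====
-- from typing import Any
--
-- def _determine_channel_indices(processor_stats: list[dict[str, list[Any]]], num_channels: int) -> list[int | None]:
--     """Determine what channel indices are needed based on processor outputs."""
--     channel_indices_needed: set[int | None] = set()
--
--     for stats in processor_stats:
--         first_stat_values = next(iter(stats.values()))
--         num_elements = len(first_stat_values)
--
--         if num_elements == 1:
--             # Single value per image/box - uses channel=None
--             channel_indices_needed.add(None)
--         elif num_elements == num_channels:
--             # Per-channel values - uses channel=0,1,2,...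
--             channel_indices_needed.update(range(num_channels))
--         else:
--             # Unexpected case
--             raise ValueError(
--                 f"Processor produced {num_elements} values but image has {num_channels} channels. "
--                 f"Expected either 1 (image-level) or {num_channels} (per-channel) values."
--             )
--
--     # Return ordered list of channel indices (None first, then 0,1,2,...)
--     return sorted(channel_indices_needed, key=lambda x: (-1 if x is None else x))
-- ===== SOURCE B (Python) =====
-- def _determine_channel_indices(processor_stats: list, num_channels: int) -> list:
--     """Determine what channel indices are needed based on processor outputs."""
--     # Stage 1: extract the element count of every processor's first stat.
--     lengths = [len(next(iter(stats.values()))) for stats in processor_stats]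
--
--     # Stage 2: validate; the first unexpected count raises, as in the original.
--     bad = next((n for n in lengths if n != 1 and n != num_channels), None)
--     if bad is not None:
--         raise ValueError(
--             f"Processor produced {bad} values but image has {num_channels} channels. "
--             f"Expected either 1 (image-level) or {num_channels} (per-channel) values."
--         )
--
--     # Stage 3: assemble the already-ordered result by two membership tests.
--     # (A count equal to num_channels==1 counts as image-level, not per-channel.)
--     return ([None] if 1 in lengths else []) + (
--         list(range(num_channels)) if num_channels != 1 and num_channels in lengths else []
--     )
-- ===== Notes on version B (the rewrite author's own statement) =====
-- stated objective: alternative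
-- what changed: Replaces the single-pass set accumulation plus final key-sort by a staged declarative pipeline: first extract the list of stat lengths, then validate it, then build the already-ordered result from two membership tests (1 in lengths, num_channels in lengths) with no accumulator and no sort.
import Mathlib
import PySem

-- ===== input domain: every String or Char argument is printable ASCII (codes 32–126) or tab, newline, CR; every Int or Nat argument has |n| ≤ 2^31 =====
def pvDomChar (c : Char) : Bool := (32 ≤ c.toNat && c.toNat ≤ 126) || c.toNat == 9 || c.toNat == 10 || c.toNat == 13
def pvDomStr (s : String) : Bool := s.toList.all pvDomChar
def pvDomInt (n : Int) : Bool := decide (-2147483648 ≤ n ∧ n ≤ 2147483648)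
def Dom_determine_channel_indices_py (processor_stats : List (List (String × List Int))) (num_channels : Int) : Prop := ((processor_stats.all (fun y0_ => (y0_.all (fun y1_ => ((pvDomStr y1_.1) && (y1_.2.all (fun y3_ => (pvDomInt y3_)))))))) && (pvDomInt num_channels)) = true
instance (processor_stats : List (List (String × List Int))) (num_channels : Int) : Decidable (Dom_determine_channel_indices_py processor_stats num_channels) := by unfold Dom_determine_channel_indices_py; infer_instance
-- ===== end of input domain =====

-- B replaces A's single-pass set accumulation + final key-sort by a staged pipeline:
-- extract the lengths list, validate it, then assemble the already-ordered result from
-- two membership tests (objective: alternative).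

-- ===== PORT A =====
-- sort key: -1 if x is None else x
def pvKeyA : Option Int → Int
  | none => -1
  | some v => v

-- the for-loop of A; `none` = the loop raised (StopIteration on an empty dict, or the ValueError)
def pvALoop (nc : Int) : List (List (String × List Int)) → PySem.Set (Option Int) → Option (PySem.Set (Option Int))
  | [], acc => some acc
  | stats :: rest, acc =>
    match stats.head? with
    | none => none  -- next(iter(stats.values())) raises StopIteration
    | some kv =>
      let num_elements : Int := (kv.2.length : Int)
      if num_elements = 1 then
        pvALoop nc rest (PySem.Set.add acc none)
      else if num_elements = nc then
        pvALoop nc rest (PySem.Set.update acc ((PySem.List.pyRange 0 nc 1).map some))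
      else
        none  -- raise ValueError(...)

def determine_channel_indices_py (processor_stats : List (List (String × List Int))) (num_channels : Int) : List (Option Int) :=
  match pvALoop num_channels processor_stats PySem.Set.empty with
  | some s => PySem.List.sorted s pvKeyA false
  | none => []  -- unreachable under Pre_

-- ===== PORT B =====
-- stage 1 of B: [len(next(iter(stats.values()))) for stats in processor_stats];
-- `none` = StopIteration on an empty dict
def pvLengths? : List (List (String × List Int)) → Option (List Int)
  | [] => some []
  | stats :: rest =>
    match stats.head? with
    | none => none  -- StopIteration
    | some kv => (pvLengths? rest).map (fun ls => ((kv.2.length : Int)) :: ls)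

def determine_channel_indices_py_alt (processor_stats : List (List (String × List Int))) (num_channels : Int) : List (Option Int) :=
  match pvLengths? processor_stats with
  | none => []  -- unreachable under Pre_
  | some lengths =>
    -- stage 2: first length that is neither 1 nor num_channels raises ValueError
    match lengths.find? (fun n => !(n == 1 || n == num_channels)) with
    | some _ => []  -- unreachable under Pre_
    | none =>
      -- stage 3: closed-form assembly in the required order
      (if (1 : Int) ∈ lengths then [Option.none] else [])
        ++ (if num_channels ≠ 1 ∧ num_channels ∈ lengths then (PySem.List.pyRange 0 num_channels 1).map some else [])

-- ===== PRECONDITION & SPEC =====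
-- Pre_ excludes exactly the inputs where A raises: a stats dict that is empty (StopIteration)
-- or whose first value list has a length that is neither 1 nor num_channels (ValueError).
def Pre_determine_channel_indices_py (processor_stats : List (List (String × List Int))) (num_channels : Int) : Prop :=
  (processor_stats.all (fun stats =>
    match stats.head? with
    | none => false
    | some kv => decide ((kv.2.length : Int) = 1 ∨ (kv.2.length : Int) = num_channels))) = true
instance (processor_stats : List (List (String × List Int))) (num_channels : Int) : Decidable (Pre_determine_channel_indices_py processor_stats num_channels) := by unfold Pre_determine_channel_indices_py; infer_instance

def pvWitness_determine_channel_indices_py : (List (List (String × List Int))) × Int :=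
  ([[("mean", [7])], [("std", [1, 2, 3])]], 3)

def Spec_determine_channel_indices_py (processor_stats : List (List (String × List Int))) (num_channels : Int) (out : List (Option Int)) : Prop := out = determine_channel_indices_py_alt processor_stats num_channels
instance (processor_stats : List (List (String × List Int))) (num_channels : Int) (out : List (Option Int)) : Decidable (Spec_determine_channel_indices_py processor_stats num_channels out) := by unfold Spec_determine_channel_indices_py; infer_instance

-- ===== CLAIM (what is proved, stated in full; the proofs are below) =====
def Claim_equal_determine_channel_indices_py : Prop := ∀ (processor_stats : List (List (String × List Int))) (num_channels : Int), Dom_determine_channel_indices_py processor_stats num_channels → Pre_determine_channel_indices_py processor_stats num_channels → Spec_determine_channel_indices_py processor_stats num_channels (determine_channel_indices_py processor_stats num_channels)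

-- ===== LEMMAS AND PROOFS =====

-- the set A accumulates, expressed from two booleans (proof helper)
def pvSetOf (nc : Int) (hn hc : Bool) : List (Option Int) :=
  (if hn then [none] else []) ++ (if hc then (PySem.List.pyRange 0 nc 1).map some else [])

lemma pvSetOf_nodup (nc : Int) (hn hc : Bool) : (pvSetOf nc hn hc).Nodup := by
  unfold pvSetOf
  cases hn <;> cases hc <;>
    simp [List.nodup_cons, PySem.List.mem_pyRange_one,
      (PySem.List.nodup_pyRange_one 0 nc).map (fun a b => Option.some.inj)]

lemma pvSetOf_pairwise (nc : Int) (hn hc : Bool) :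
    (pvSetOf nc hn hc).Pairwise (fun a b => pvKeyA a < pvKeyA b) := by
  unfold pvSetOf
  have hmap : ((PySem.List.pyRange 0 nc 1).map some).Pairwise
      (fun a b : Option Int => pvKeyA a < pvKeyA b) := by
    refine List.Pairwise.map some (fun a b h => ?_) (PySem.List.pairwise_lt_pyRange_one 0 nc)
    simpa [pvKeyA] using h
  cases hn <;> cases hc
  · simp
  · simpa using hmap
  · simp
  · simp [hmap]
    intro a b h0 hlt heq
    subst heq
    simp only [pvKeyA]
    omega

-- characterisation of A's loop on inputs satisfying Pre_: it returns a nodup set whose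
-- members are acc's plus None (if some length is 1) plus range(nc) (if some length is nc ≠ 1),
-- where the lengths are exactly what B's stage 1 extracts; all lengths are 1 or nc
lemma pvALoop_char (nc : Int) : ∀ (ps : List (List (String × List Int)))
    (acc : PySem.Set (Option Int)) (hn hc : Bool),
    Pre_determine_channel_indices_py ps nc → acc.Nodup →
    (∀ x, x ∈ acc ↔ x ∈ pvSetOf nc hn hc) →
    ∃ L s, pvLengths? ps = some L ∧ pvALoop nc ps acc = some s ∧ s.Nodup ∧
      (∀ n ∈ L, n = 1 ∨ n = nc) ∧
      (∀ x, x ∈ s ↔ x ∈ pvSetOf nc (hn || decide ((1 : Int) ∈ L)) (hc || decide (nc ≠ 1 ∧ nc ∈ L))) := by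
  intro ps
  induction ps with
  | nil =>
    intro acc hn hc _ hnd hmem
    exact ⟨[], acc, rfl, rfl, hnd, by simp, by simpa using hmem⟩
  | cons stats rest ih =>
    intro acc hn hc hpre hnd hmem
    unfold Pre_determine_channel_indices_py at hpre
    simp [List.all_cons] at hpre
    obtain ⟨h1, h2⟩ := hpre
    have hrest : Pre_determine_channel_indices_py rest nc := by
      unfold Pre_determine_channel_indices_py; simpa using h2
    match hh : stats.head? with
    | Option.none => simp [hh] at h1
    | Option.some kv =>
      simp [hh] at h1
      by_cases hl1 : (kv.2.length : Int) = 1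
      · -- branch: num_elements == 1, A adds None
        obtain ⟨L', s, hL', hA', hnd', hok', hmem'⟩ :=
          ih (PySem.Set.add acc Option.none) true hc hrest
            (PySem.Set.nodup_add _ _ hnd)
            (by
              intro x
              rw [PySem.Set.mem_add, hmem x]
              unfold pvSetOf; cases hn <;> cases hc <;> simp [or_comm])
        refine ⟨1 :: L', s, ?_, ?_, hnd', ?_, ?_⟩
        · simp [pvLengths?, hh, hl1, hL']
        · simp [pvALoop, hh, hl1, hA']
        · intro n hn'; rcases List.mem_cons.mp hn' with h | h
          · exact Or.inl h
          · exact hok' n h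
        · intro x
          rw [hmem' x]
          have e1 : (hn || decide ((1:Int) ∈ 1 :: L')) = true := by
            simp [List.mem_cons]
          have e2 : (hc || decide (nc ≠ 1 ∧ nc ∈ 1 :: L')) = (hc || decide (nc ≠ 1 ∧ nc ∈ L')) := by
            congr 1
            rw [decide_eq_decide]
            constructor
            · rintro ⟨hne, h⟩
              rcases List.mem_cons.mp h with h | h
              · exact absurd h hne
              · exact ⟨hne, h⟩
            · rintro ⟨hne, h⟩; exact ⟨hne, List.mem_cons_of_mem _ h⟩
          rw [e1, e2]
          simp
      · -- branch: num_elements == num_channels, A adds range(nc)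
        have hlnc : (kv.2.length : Int) = nc := by
          rcases h1 with h | h
          · omega
          · exact h
        have hne1 : nc ≠ 1 := fun h => hl1 (by rw [hlnc, h])
        obtain ⟨L', s, hL', hA', hnd', hok', hmem'⟩ :=
          ih (PySem.Set.update acc ((PySem.List.pyRange 0 nc 1).map some)) hn true hrest
            (PySem.Set.nodup_update _ _ hnd)
            (by
              intro x
              rw [PySem.Set.mem_update, hmem x]
              unfold pvSetOf; cases hn <;> cases hc <;> simp [or_comm, or_left_comm])
        refine ⟨nc :: L', s, ?_, ?_, hnd', ?_, ?_⟩
        · simp [pvLengths?, hh, hlnc, hL']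
        · simp only [pvALoop, hh]
          rw [if_neg hl1, if_pos hlnc]
          exact hA'
        · intro n hn'; rcases List.mem_cons.mp hn' with h | h
          · exact Or.inr h
          · exact hok' n h
        · intro x
          rw [hmem' x]
          have e1 : (hn || decide ((1:Int) ∈ nc :: L')) = (hn || decide ((1:Int) ∈ L')) := by
            congr 1
            rw [decide_eq_decide]
            constructor
            · intro h
              rcases List.mem_cons.mp h with h | h
              · exact absurd h.symm hne1
              · exact h
            · intro h; exact List.mem_cons_of_mem _ h
          have e2 : (hc || decide (nc ≠ 1 ∧ nc ∈ nc :: L')) = true := by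
            simp [List.mem_cons, hne1]
          rw [e1, e2]
          simp

-- ===== VERDICT (by name: the statement is the Claim_ definition above) =====
theorem determine_channel_indices_py_spec : Claim_equal_determine_channel_indices_py := by
  intro ps nc _ hpre
  unfold Spec_determine_channel_indices_py
  unfold determine_channel_indices_py determine_channel_indices_py_alt
  obtain ⟨L, s, hL, hA, hnd, hok, hmem⟩ :=
    pvALoop_char nc ps PySem.Set.empty false false hpre (by simp [PySem.Set.empty])
      (by intro x; simp [PySem.Set.empty, pvSetOf])
  have hfind : L.find? (fun n => !(n == 1 || n == nc)) = Option.none := by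
    rw [List.find?_eq_none]
    intro n hn
    rcases hok n hn with h | h <;> simp [h]
  rw [hA, hL]
  simp only [hfind]
  have hrw : (if (1 : Int) ∈ L then [Option.none] else [])
      ++ (if nc ≠ 1 ∧ nc ∈ L then (PySem.List.pyRange 0 nc 1).map some else [])
      = pvSetOf nc (decide ((1 : Int) ∈ L)) (decide (nc ≠ 1 ∧ nc ∈ L)) := by
    unfold pvSetOf
    simp only [decide_eq_true_eq]
  rw [hrw]
  have hmem' : ∀ x, x ∈ s ↔ x ∈ pvSetOf nc (decide ((1 : Int) ∈ L)) (decide (nc ≠ 1 ∧ nc ∈ L)) := by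
    intro x; simpa using hmem x
  have hperm : (pvSetOf nc (decide ((1 : Int) ∈ L)) (decide (nc ≠ 1 ∧ nc ∈ L))).Perm s :=
    (List.perm_ext_iff_of_nodup (pvSetOf_nodup nc _ _) hnd).mpr (fun x => (hmem' x).symm)
  exact PySem.List.sorted_eq_of_perm_of_pairwise_lt s _ pvKeyA hperm (pvSetOf_pairwise nc _ _)
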